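-- pv_equiv track=rewrite | github.com/soxballs/gcpwn | gcpwn/cli/workspace_instructions.py | _group_permission_display_rows
-- ===== SOURCE A (Python) =====
-- from typing import Any, Dict, List
--
-- def _group_permission_display_rows(rows: list[dict[str, Any]]) -> tuple[list[dict[str, str]], set[int]]:
--     grouped: dict[str, list[str]] = {}
--     for row in rows or []:
--         if not isinstance(row, dict):
--             continue
--         permission = str(row.get("Permission") or "").strip()
--         derived_from = str(row.get("Derived From") or "").strip()
--         if not permission:
--             continue
--         grouped.setdefault(derived_from, []).append(permission)
--
--     display_rows: list[dict[str, str]] = []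
--     divider_indices: set[int] = set()
--     group_keys = sorted(grouped, key=lambda item: (item == "", item))
--     for group_index, derived_from in enumerate(group_keys):
--         permissions = sorted(set(grouped.get(derived_from) or []))
--         for permission_index, permission in enumerate(permissions):
--             display_rows.append(
--                 {
--                     "Permission": permission,
--                     "Derived From": derived_from if permission_index == 0 else "",
--                 }
--             )
--         if permissions and group_index != len(group_keys) - 1:
--             divider_indices.add(len(display_rows) - 1)
--
--     return display_rows, divider_indices
-- ===== SOURCE B (Python) =====
-- def _group_permission_display_rows(rows):
--     pairs = set()
--     for row in rows or []:
--         if not isinstance(row, dict):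
--             continue
--         permission = str(row.get("Permission") or "").strip()
--         derived_from = str(row.get("Derived From") or "").strip()
--         if permission:
--             pairs.add((derived_from, permission))
--
--     ordered = sorted(pairs, key=lambda dp: (dp[0] == "", dp[0], dp[1]))
--     display_rows = []
--     divider_indices = set()
--     prev = None
--     for derived_from, permission in ordered:
--         if prev is not None and derived_from != prev:
--             divider_indices.add(len(display_rows) - 1)
--         display_rows.append(
--             {
--                 "Permission": permission,
--                 "Derived From": derived_from if derived_from != prev else "",
--             }
--         )
--         prev = derived_from
--     return display_rows, divider_indices
-- ===== Notes on version B (the rewrite author's own statement) =====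
-- stated objective: simpler
-- what changed: Instead of building a dict of per-derived-from permission lists and nested enumerate loops with an is-last-group divider test, B dedups (derived_from, permission) pairs into one set, sorts it once by the composite key (derived_from == '', derived_from, permission), and emits rows and dividers in a single pass that tracks the previous derived_from.
import Mathlib
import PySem

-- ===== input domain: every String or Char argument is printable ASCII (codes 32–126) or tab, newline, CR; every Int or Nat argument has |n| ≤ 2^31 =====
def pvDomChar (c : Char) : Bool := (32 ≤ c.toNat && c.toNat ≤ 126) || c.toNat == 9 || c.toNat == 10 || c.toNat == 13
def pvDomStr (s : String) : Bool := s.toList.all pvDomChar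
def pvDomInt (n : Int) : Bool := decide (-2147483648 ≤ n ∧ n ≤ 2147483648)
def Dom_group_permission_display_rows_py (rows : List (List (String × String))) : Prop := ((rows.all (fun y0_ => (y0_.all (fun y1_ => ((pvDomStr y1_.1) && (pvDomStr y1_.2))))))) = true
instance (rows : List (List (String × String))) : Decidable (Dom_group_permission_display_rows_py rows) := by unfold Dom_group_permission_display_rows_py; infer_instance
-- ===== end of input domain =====

-- B flattens A's dict-of-lists grouping into one dedup-and-sort over (derived_from, permission)
-- pairs followed by a single pass with a previous-key tracker (objective: simpler decomposition;
-- same asymptotic cost).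

def pvStA : Type := (List (List (String × String))) × PySem.Set Int

-- ===== PORT A =====
-- str(row.get(k) or "").strip(): the values are strings, so 'or ""' only maps a missing/empty
-- value to "" — which getD with default "" already does; strip of "" is "".
def pvRowField (row : List (String × String)) (k : String) : String :=
  PySem.Str.strip ((PySem.Dict.ofList row).getD k "")

-- Python's sort key lambda item: (item == "", item), tuple order = lexicographic
def pvKeyGroup (k : String) : Lex (Bool × String) := toLex (decide (k = ""), k)

-- one iteration of A's display loop: inner loop over enumerate(permissions), then the divider
def pvABody (grouped : PySem.Dict String (List String)) (N : Int) (st : pvStA)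
    (gi : Int × String) : pvStA :=
  let permissions := PySem.List.sorted (PySem.Set.ofList (grouped.getD gi.2 [])) (fun p => p) false
  let st1 :=
    (PySem.List.enumerate permissions 0).foldl
      (fun (st2 : pvStA) pi =>
        (st2.1 ++ [[("Permission", pi.2), ("Derived From", if pi.1 = 0 then gi.2 else "")]], st2.2))
      st
  if permissions ≠ [] ∧ gi.1 ≠ N - 1 then
    (st1.1, PySem.Set.add st1.2 (PySem.List.len st1.1 - 1))
  else st1

def group_permission_display_rows_py (rows : List (List (String × String))) :
    (List (List (String × String))) × List Int :=
  -- grouped.setdefault(derived_from, []).append(permission)  ==  d[k] = d.get(k, []) + [p]  ==  Dict.modify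
  let grouped : PySem.Dict String (List String) :=
    rows.foldl (fun g row =>
      let permission := pvRowField row "Permission"
      let derived_from := pvRowField row "Derived From"
      if permission = "" then g
      else g.modify derived_from [] (· ++ [permission])) PySem.Dict.empty
  let group_keys := PySem.List.sorted grouped.keys pvKeyGroup false
  (PySem.List.enumerate group_keys 0).foldl
    (pvABody grouped (PySem.List.len group_keys)) ([], PySem.Set.empty)

-- ===== PORT B =====
-- Python's sort key lambda dp: (dp[0] == "", dp[0], dp[1]), tuple order = lexicographic
def pvKeyPair (q : String × String) : Lex (Bool × Lex (String × String)) :=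
  toLex (decide (q.1 = ""), toLex (q.1, q.2))

def pvStB : Type := (List (List (String × String))) × PySem.Set Int × Option String

-- one iteration of B's single pass: divider on key change, row, previous-key update
def pvBBody (st : pvStB) (q : String × String) : pvStB :=
  let divs := if st.2.2 ≠ none ∧ some q.1 ≠ st.2.2
    then PySem.Set.add st.2.1 (PySem.List.len st.1 - 1) else st.2.1
  (st.1 ++ [[("Permission", q.2), ("Derived From", if some q.1 ≠ st.2.2 then q.1 else "")]],
   divs, some q.1)

def group_permission_display_rows_py_alt (rows : List (List (String × String))) :
    (List (List (String × String))) × List Int :=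
  let pairs : PySem.Set (String × String) :=
    rows.foldl (fun s row =>
      let permission := pvRowField row "Permission"
      let derived_from := pvRowField row "Derived From"
      if permission = "" then s
      else PySem.Set.add s (derived_from, permission)) PySem.Set.empty
  -- sorted(pairs, key=…): the key is injective on the set, so the result is hash-order independent
  let ordered := PySem.List.sorted pairs pvKeyPair false
  let res := ordered.foldl pvBBody ([], PySem.Set.empty, none)
  (res.1, res.2.1)

-- ===== PRECONDITION & SPEC =====
def Spec_group_permission_display_rows_py (rows : List (List (String × String))) (out : (List (List (String × String))) × List Int) : Prop := out = group_permission_display_rows_py_alt rows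
instance (rows : List (List (String × String))) (out : (List (List (String × String))) × List Int) : Decidable (Spec_group_permission_display_rows_py rows out) := by unfold Spec_group_permission_display_rows_py; infer_instance

-- ===== CLAIM (what is proved, stated in full; the proofs are below) =====
def Claim_equal_group_permission_display_rows_py : Prop := ∀ (rows : List (List (String × String))), Dom_group_permission_display_rows_py rows → Spec_group_permission_display_rows_py rows (group_permission_display_rows_py rows)

-- ===== LEMMAS AND PROOFS =====

-- the valid (derived_from, permission) pairs of the input, in row order
def pvPair (row : List (String × String)) : String × String :=
  (pvRowField row "Derived From", pvRowField row "Permission")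

def pvP (rows : List (List (String × String))) : List (String × String) :=
  (rows.map pvPair).filter (fun q => !decide (q.2 = ""))

def pvG (rows : List (List (String × String))) : PySem.Dict String (List String) :=
  (pvP rows).foldl (fun g q => g.modify q.1 [] (· ++ [q.2])) PySem.Dict.empty

-- A's per-permission sorted keys, as a function of the group key
def pvPs (rows : List (List (String × String))) (d : String) : List String :=
  PySem.List.sorted (PySem.Set.ofList ((pvG rows).getD d [])) (fun p => p) false

def pvRowBlank (p : String) : List (String × String) :=
  [("Permission", p), ("Derived From", "")]

def pvRowsOf (d : String) : List String → List (List (String × String))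
  | [] => []
  | p :: rest => [("Permission", p), ("Derived From", d)] :: rest.map pvRowBlank

-- reference recursion: per group append its rows, and a divider after every group but the last
def pvRecA (ps : String → List String) : List String → pvStA → pvStA
  | [], st => st
  | d :: rest, st =>
    let R' := st.1 ++ pvRowsOf d (ps d)
    if rest = [] then (R', st.2)
    else pvRecA ps rest (R', PySem.Set.add st.2 (PySem.List.len R' - 1))

-- both collection loops are the same filtered fold over the valid pairs
theorem pv_fold_fusion {σ : Type} (f : σ → String × String → σ) :
    ∀ (rows : List (List (String × String))) (init : σ),
      rows.foldl (fun s row =>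
        if pvRowField row "Permission" = "" then s
        else f s (pvRowField row "Derived From", pvRowField row "Permission")) init
      = (pvP rows).foldl f init := by
  intro rows
  induction rows with
  | nil => intro init; simp [pvP]
  | cons row rest ih =>
    intro init
    by_cases h : pvRowField row "Permission" = "" <;>
      simp [pvP, pvPair, h, List.foldl_cons, ih]

theorem pv_grouped_eq (rows : List (List (String × String))) :
    rows.foldl (fun g row =>
      if pvRowField row "Permission" = "" then g
      else PySem.Dict.modify g (pvRowField row "Derived From") [] (· ++ [pvRowField row "Permission"]))
      PySem.Dict.empty = pvG rows := by
  exact pv_fold_fusion (fun g q => PySem.Dict.modify g q.1 [] (· ++ [q.2])) rows PySem.Dict.empty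

theorem pv_pairs_eq (rows : List (List (String × String))) :
    rows.foldl (fun s row =>
      if pvRowField row "Permission" = "" then s
      else PySem.Set.add s (pvRowField row "Derived From", pvRowField row "Permission"))
      PySem.Set.empty = PySem.Set.ofList (pvP rows) := by
  rw [PySem.Set.ofList_eq_foldl]
  exact pv_fold_fusion (fun s q => PySem.Set.add s q) rows PySem.Set.empty

theorem pv_getD_G (rows : List (List (String × String))) (c : String) :
    (pvG rows).getD c [] = ((pvP rows).filter (fun q => q.1 == c)).map (·.2) := by
  unfold pvG
  rw [PySem.Dict.getD_foldl_modify_append]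
  simp

theorem pv_keys_G (rows : List (List (String × String))) :
    (pvG rows).keys = PySem.Set.ofList ((pvP rows).map (·.1)) := by
  unfold pvG
  rw [PySem.Dict.keys_foldl_modify_key (key := fun q : String × String => q.1)
    (f := fun _ q => (· ++ [q.2])) (d0 := []) (d := PySem.Dict.empty)]
  simp [PySem.Set.update_nil_left]

theorem pv_mem_P (rows : List (List (String × String))) (d p : String) :
    (d, p) ∈ pvP rows ↔ p ∈ (pvG rows).getD d [] := by
  rw [pv_getD_G]
  constructor
  · intro h
    exact List.mem_map.mpr ⟨(d, p), List.mem_filter.mpr ⟨h, by simp⟩, rfl⟩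
  · intro h
    obtain ⟨q, hq, hq2⟩ := List.mem_map.mp h
    obtain ⟨hqP, hq1⟩ := List.mem_filter.mp hq
    have h1 : q.1 = d := by simpa using hq1
    obtain ⟨a, b⟩ := q
    simp_all

-- the big ordering fact: B's single sort of the pair set is A's groups laid out flat
theorem pv_order (rows : List (List (String × String))) :
    PySem.List.sorted (PySem.Set.ofList (pvP rows)) pvKeyPair false
    = (PySem.List.sorted (pvG rows).keys pvKeyGroup false).flatMap
        (fun d => (pvPs rows d).map (fun p => (d, p))) := by
  have hKperm : (PySem.List.sorted (pvG rows).keys pvKeyGroup false).Perm (pvG rows).keys :=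
    PySem.List.sorted_perm _ _ _
  have hkeysnd : (pvG rows).keys.Nodup := by
    rw [pv_keys_G]; exact PySem.Set.nodup_ofList _
  have hKnd : (PySem.List.sorted (pvG rows).keys pvKeyGroup false).Nodup :=
    hKperm.nodup_iff.mpr hkeysnd
  have hKle : (PySem.List.sorted (pvG rows).keys pvKeyGroup false).Pairwise
      (fun a b => pvKeyGroup a ≤ pvKeyGroup b) := PySem.List.sorted_pairwise _ _
  have hKlt : (PySem.List.sorted (pvG rows).keys pvKeyGroup false).Pairwise
      (fun a b => pvKeyGroup a < pvKeyGroup b) := by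
    refine (hKle.and hKnd).imp ?_
    rintro a b ⟨hle, hne⟩
    refine lt_of_le_of_ne hle (fun e => hne ?_)
    have := congrArg (fun x => (ofLex x).2) e
    simpa [pvKeyGroup] using this
  have hLpair : ((PySem.List.sorted (pvG rows).keys pvKeyGroup false).flatMap
      (fun d => (pvPs rows d).map (fun p => (d, p)))).Pairwise
      (fun a b => pvKeyPair a < pvKeyPair b) := by
    rw [List.pairwise_flatMap]
    constructor
    · intro a _
      refine List.Pairwise.map _ ?_ (PySem.List.sorted_ofList_pairwise_lt (xs := (pvG rows).getD a []))
      intro p p' hpp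
      simp only [pvKeyPair]
      exact Prod.Lex.toLex_lt_toLex.mpr (Or.inr ⟨rfl, Prod.Lex.toLex_lt_toLex.mpr (Or.inr ⟨rfl, hpp⟩)⟩)
    · refine hKlt.imp ?_
      intro a b hab x hx y hy
      obtain ⟨px, _, rfl⟩ := List.mem_map.mp hx
      obtain ⟨py, _, rfl⟩ := List.mem_map.mp hy
      simp only [pvKeyGroup] at hab
      simp only [pvKeyPair]
      rcases Prod.Lex.toLex_lt_toLex.mp hab with h1 | ⟨h1, h2⟩
      · exact Prod.Lex.toLex_lt_toLex.mpr (Or.inl h1)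
      · exact Prod.Lex.toLex_lt_toLex.mpr
          (Or.inr ⟨h1, Prod.Lex.toLex_lt_toLex.mpr (Or.inl h2)⟩)
  have hLnd : ((PySem.List.sorted (pvG rows).keys pvKeyGroup false).flatMap
      (fun d => (pvPs rows d).map (fun p => (d, p)))).Nodup := by
    refine hLpair.imp ?_
    intro a b h e
    subst e; exact lt_irrefl _ h
  have hmem : ∀ q, q ∈ ((PySem.List.sorted (pvG rows).keys pvKeyGroup false).flatMap
      (fun d => (pvPs rows d).map (fun p => (d, p)))) ↔ q ∈ PySem.Set.ofList (pvP rows) := by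
    rintro ⟨d, p⟩
    rw [List.mem_flatMap, PySem.Set.mem_ofList]
    constructor
    · rintro ⟨a, haK, hx⟩
      obtain ⟨p', hp', he⟩ := List.mem_map.mp hx
      obtain ⟨rfl, rfl⟩ := Prod.mk.injEq .. ▸ (by exact Prod.mk.inj he : a = d ∧ p' = p)
      have : p ∈ (pvG rows).getD d [] := by
        have := (PySem.List.mem_sorted _ _ _ _).mp hp'
        exact (PySem.Set.mem_ofList _ _).mp this
      exact (pv_mem_P rows d p).mpr this
    · intro hP
      refine ⟨d, ?_, List.mem_map.mpr ⟨p, ?_, rfl⟩⟩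
      · rw [PySem.List.mem_sorted, pv_keys_G, PySem.Set.mem_ofList]
        exact List.mem_map.mpr ⟨(d, p), hP, rfl⟩
      · rw [pvPs, PySem.List.mem_sorted, PySem.Set.mem_ofList]
        exact (pv_mem_P rows d p).mp hP
  have hperm := (List.perm_ext_iff_of_nodup hLnd (PySem.Set.nodup_ofList _)).mpr hmem
  exact PySem.List.sorted_eq_of_perm_of_pairwise_lt _ _ _ hperm hLpair

theorem pv_A_inner (d : String) :
    ∀ (perms : List String) (s : Int) (st : pvStA),
      (PySem.List.enumerate perms s).foldl
        (fun (st2 : pvStA) pi =>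
          (st2.1 ++ [[("Permission", pi.2), ("Derived From", if pi.1 = 0 then d else "")]], st2.2)) st
      = (st.1 ++ (PySem.List.enumerate perms s).map
            (fun pi => [("Permission", pi.2), ("Derived From", if pi.1 = 0 then d else "")]), st.2) := by
  intro perms
  induction perms with
  | nil => intro s st; simp [PySem.List.enumerate_nil]
  | cons p rest ih =>
    intro s st
    rw [PySem.List.enumerate_cons]
    simp only [List.foldl_cons, List.map_cons, ih]
    simp

theorem pv_enum_blank (d : String) :
    ∀ (perms : List String) (s : Int), 1 ≤ s →
      (PySem.List.enumerate perms s).map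
        (fun pi => [("Permission", pi.2), ("Derived From", if pi.1 = 0 then d else "")])
      = perms.map pvRowBlank := by
  intro perms
  induction perms with
  | nil => intro s _; simp [PySem.List.enumerate_nil]
  | cons p rest ih =>
    intro s hs
    rw [PySem.List.enumerate_cons]
    simp only [List.map_cons]
    rw [ih (s + 1) (by omega)]
    have : s ≠ 0 := by omega
    simp [pvRowBlank, this]

theorem pv_rows_of (d : String) (perms : List String) :
    (PySem.List.enumerate perms 0).map
        (fun pi => [("Permission", pi.2), ("Derived From", if pi.1 = 0 then d else "")])
    = pvRowsOf d perms := by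
  cases perms with
  | nil => simp [PySem.List.enumerate_nil, pvRowsOf]
  | cons p rest =>
    rw [PySem.List.enumerate_cons]
    simp only [List.map_cons, pvRowsOf, zero_add]
    rw [pv_enum_blank d rest 1 (by omega)]
    simp

theorem pv_A_outer (g : PySem.Dict String (List String)) (N : Int) :
    ∀ (gs : List String) (s : Int) (st : pvStA),
      (∀ d ∈ gs, PySem.List.sorted (PySem.Set.ofList (g.getD d [])) (fun p => p) false ≠ []) →
      s + gs.length = N →
      (PySem.List.enumerate gs s).foldl (pvABody g N) st
      = pvRecA (fun d => PySem.List.sorted (PySem.Set.ofList (g.getD d [])) (fun p => p) false) gs st := by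
  intro gs
  induction gs with
  | nil => intro s st _ _; simp [PySem.List.enumerate_nil, pvRecA]
  | cons d rest ih =>
    intro s st hne hN
    rw [PySem.List.enumerate_cons]
    simp only [List.foldl_cons]
    have hstep : pvABody g N st (s, d)
        = (if PySem.List.sorted (PySem.Set.ofList (g.getD d [])) (fun p => p) false ≠ [] ∧ s ≠ N - 1 then
            (st.1 ++ pvRowsOf d (PySem.List.sorted (PySem.Set.ofList (g.getD d [])) (fun p => p) false),
             PySem.Set.add st.2 (PySem.List.len (st.1 ++ pvRowsOf d (PySem.List.sorted (PySem.Set.ofList (g.getD d [])) (fun p => p) false)) - 1))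
          else (st.1 ++ pvRowsOf d (PySem.List.sorted (PySem.Set.ofList (g.getD d [])) (fun p => p) false), st.2)) := by
      unfold pvABody
      simp only [pv_A_inner, pv_rows_of]
      rfl
    have hdne := hne d (List.mem_cons_self ..)
    by_cases hr : rest = []
    · subst hr
      have hs : s = N - 1 := by
        simp only [List.length_cons, List.length_nil] at hN
        push_cast at hN
        omega
      rw [hstep]
      simp [PySem.List.enumerate_nil, pvRecA, hs]
    · have hs : s ≠ N - 1 := by
        have hlen : (1 : Int) ≤ rest.length := by
          exact_mod_cast List.length_pos_iff.mpr hr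
        simp only [List.length_cons] at hN
        push_cast at hN
        omega
      rw [hstep]
      simp only [hdne, hs, ne_eq, not_false_iff, and_self, if_true]
      rw [ih (s + 1) _ (fun x hx => hne x (List.mem_cons_of_mem _ hx))
        (by simp only [List.length_cons] at hN; push_cast at hN ⊢; omega)]
      simp only [pvRecA, hr]
      simp

theorem pv_B_inner (d : String) :
    ∀ (ps' : List String) (R : List (List (String × String))) (V : PySem.Set Int),
      (ps'.map (fun p => (d, p))).foldl pvBBody (R, V, some d)
      = (R ++ ps'.map pvRowBlank, V, some d) := by
  intro ps'
  induction ps' with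
  | nil => intro R V; simp
  | cons p rest ih =>
    intro R V
    simp only [List.map_cons, List.foldl_cons]
    have hb : pvBBody (R, V, some d) (d, p) = (R ++ [pvRowBlank p], V, some d) := by
      simp [pvBBody, pvRowBlank]
    rw [hb, ih]
    simp

theorem pv_B_group (d p : String) (ps' : List String) (tail : List (String × String))
    (R : List (List (String × String))) (V : PySem.Set Int) (prev : Option String)
    (hprev : prev ≠ some d) :
    ((((p :: ps').map (fun p => (d, p))) ++ tail)).foldl pvBBody (R, V, prev)
    = tail.foldl pvBBody (R ++ pvRowsOf d (p :: ps'),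
        (if prev = none then V else PySem.Set.add V (PySem.List.len R - 1)), some d) := by
  rw [List.foldl_append]
  congr 1
  simp only [List.map_cons, List.foldl_cons]
  have hne : some d ≠ prev := fun e => hprev e.symm
  have hb : pvBBody (R, V, prev) (d, p)
      = (R ++ [[("Permission", p), ("Derived From", d)]],
         (if prev = none then V else PySem.Set.add V (PySem.List.len R - 1)), some d) := by
    cases prev with
    | none => simp [pvBBody]
    | some d0 =>
      have : d0 ≠ d := fun e => hprev (by rw [e])
      simp [pvBBody, hne]
  rw [hb, pv_B_inner]
  simp [pvRowsOf]

theorem pv_MAIN (ps : String → List String) :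
    ∀ (gs : List String) (R : List (List (String × String))) (V : PySem.Set Int) (d₀ : String),
      (∀ d ∈ gs, ps d ≠ []) → gs.Nodup → d₀ ∉ gs →
      (((gs.flatMap (fun d => (ps d).map (fun p => (d, p)))).foldl pvBBody (R, V, some d₀)).1,
       ((gs.flatMap (fun d => (ps d).map (fun p => (d, p)))).foldl pvBBody (R, V, some d₀)).2.1)
      = (if gs = [] then (R, V)
         else pvRecA ps gs (R, PySem.Set.add V (PySem.List.len R - 1))) := by
  intro gs
  induction gs with
  | nil => intro R V d₀ _ _ _; simp
  | cons d rest ih =>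
    intro R V d₀ hne hnd hd₀
    have hdne := hne d (List.mem_cons_self ..)
    obtain ⟨p, ps', hps⟩ : ∃ p ps', ps d = p :: ps' := by
      cases h : ps d with
      | nil => exact absurd h hdne
      | cons a b => exact ⟨a, b, rfl⟩
    have hd₀d : (some d₀ : Option String) ≠ some d := by
      intro e
      cases Option.some.inj e
      exact hd₀ (List.mem_cons_self ..)
    rw [List.flatMap_cons, hps, pv_B_group d p ps' _ R V (some d₀) hd₀d]
    by_cases hr : rest = []
    · subst hr
      simp only [List.flatMap_nil, List.foldl_nil]
      simp [pvRecA, hps]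
    · rw [ih (R ++ pvRowsOf d (p :: ps')) _ d
        (fun x hx => hne x (List.mem_cons_of_mem _ hx))
        (List.nodup_cons.mp hnd).2
        (List.nodup_cons.mp hnd).1]
      simp only [hr]
      have : ¬ (d :: rest = []) := by simp
      simp only [pvRecA, hps, if_neg hr]
      simp

theorem pv_TOP (ps : String → List String) (gs : List String)
    (hne : ∀ d ∈ gs, ps d ≠ []) (hnd : gs.Nodup) :
    (((gs.flatMap (fun d => (ps d).map (fun p => (d, p)))).foldl pvBBody
        ([], PySem.Set.empty, none)).1,
     ((gs.flatMap (fun d => (ps d).map (fun p => (d, p)))).foldl pvBBody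
        ([], PySem.Set.empty, none)).2.1)
    = pvRecA ps gs ([], PySem.Set.empty) := by
  cases gs with
  | nil => simp [pvRecA]
  | cons d rest =>
    have hdne := hne d (List.mem_cons_self ..)
    obtain ⟨p, ps', hps⟩ : ∃ p ps', ps d = p :: ps' := by
      cases h : ps d with
      | nil => exact absurd h hdne
      | cons a b => exact ⟨a, b, rfl⟩
    rw [List.flatMap_cons, hps,
      pv_B_group d p ps' _ [] PySem.Set.empty none (by simp)]
    by_cases hr : rest = []
    · subst hr
      simp [pvRecA, hps]
    · rw [pv_MAIN ps rest (([] : List (List (String × String))) ++ pvRowsOf d (p :: ps')) _ d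
        (fun x hx => hne x (List.mem_cons_of_mem _ hx))
        (List.nodup_cons.mp hnd).2
        (List.nodup_cons.mp hnd).1]
      simp only [if_neg hr]
      simp only [pvRecA, hps, if_neg hr]
      simp

-- ===== VERDICT (by name: the statement is the Claim_ definition above) =====
theorem group_permission_display_rows_py_spec : Claim_equal_group_permission_display_rows_py := by
  intro rows _
  unfold Spec_group_permission_display_rows_py
  have hKperm2 : (PySem.List.sorted (pvG rows).keys pvKeyGroup false).Perm (pvG rows).keys :=
    PySem.List.sorted_perm _ _ _
  have hKnd : (PySem.List.sorted (pvG rows).keys pvKeyGroup false).Nodup :=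
    hKperm2.nodup_iff.mpr (by rw [pv_keys_G]; exact PySem.Set.nodup_ofList _)
  have hne : ∀ d ∈ PySem.List.sorted (pvG rows).keys pvKeyGroup false,
      PySem.List.sorted (PySem.Set.ofList ((pvG rows).getD d [])) (fun p => p) false ≠ [] := by
    intro d hd
    rw [PySem.List.mem_sorted, pv_keys_G, PySem.Set.mem_ofList] at hd
    obtain ⟨q, hq, hq1⟩ := List.mem_map.mp hd
    have : (d, q.2) ∈ pvP rows := by
      obtain ⟨a, b⟩ := q; cases hq1; exact hq
    have hmem : q.2 ∈ PySem.List.sorted (PySem.Set.ofList ((pvG rows).getD d [])) (fun p => p) false := by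
      rw [PySem.List.mem_sorted, PySem.Set.mem_ofList]
      exact (pv_mem_P rows d q.2).mp this
    exact List.ne_nil_of_mem hmem
  show group_permission_display_rows_py rows = group_permission_display_rows_py_alt rows
  simp only [group_permission_display_rows_py, group_permission_display_rows_py_alt,
    pv_grouped_eq, pv_pairs_eq, pv_order]
  exact (pv_A_outer (pvG rows) (PySem.List.len (PySem.List.sorted (pvG rows).keys pvKeyGroup false))
      (PySem.List.sorted (pvG rows).keys pvKeyGroup false) 0 ([], PySem.Set.empty) hne (by simp)).trans
    (pv_TOP (fun d => PySem.List.sorted (PySem.Set.ofList ((pvG rows).getD d [])) (fun p => p) false)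
      (PySem.List.sorted (pvG rows).keys pvKeyGroup false) hne hKnd).symm
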